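-- pv_equiv track=rewrite | github.com/ThriceInATrice/advent_of_code_2024 | dec_4th/dec_4th.py | get_ascending_diagonals
-- ===== SOURCE A (Python) =====
-- def get_ascending_diagonals(char_matrix):
--     """this function returns a list of the characters along each diagonal line in the
--     orginal character matrix. ascending refers to the fact that the lines start in the
--     bottom left and descend to the top right
--     """
--     diagonals = []
--     for start in [(i, 0) for i in range(len(char_matrix) - 1)] + [
--         (len(char_matrix) - 1, i) for i in range(len(char_matrix))
--     ]:
--         y, x = start
--         line = []
--         while 0 <= x < len(char_matrix) and 0 <= y < len(char_matrix):
--             line.append(char_matrix[y][x])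
--             x += 1
--             y -= 1
--         diagonals.append(line)
--     return diagonals
-- ===== SOURCE B (Python) =====
-- def get_ascending_diagonals(char_matrix):
--     """Single scan: bucket each cell into diagonal x + y instead of walking
--     each diagonal from a start point."""
--     n = len(char_matrix)
--     diagonals = [[] for _ in range(2 * n - 1)]
--     for y in range(n - 1, -1, -1):
--         for x in range(n):
--             diagonals[x + y].append(char_matrix[y][x])
--     return diagonals
-- ===== Notes on version B (the rewrite author's own statement) =====
-- stated objective: alternative
-- what changed: Replaces the per-diagonal while-loop walk from precomputed start points by a single row-by-row scan that buckets each cell into diagonal index x+y.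
import Mathlib
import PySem

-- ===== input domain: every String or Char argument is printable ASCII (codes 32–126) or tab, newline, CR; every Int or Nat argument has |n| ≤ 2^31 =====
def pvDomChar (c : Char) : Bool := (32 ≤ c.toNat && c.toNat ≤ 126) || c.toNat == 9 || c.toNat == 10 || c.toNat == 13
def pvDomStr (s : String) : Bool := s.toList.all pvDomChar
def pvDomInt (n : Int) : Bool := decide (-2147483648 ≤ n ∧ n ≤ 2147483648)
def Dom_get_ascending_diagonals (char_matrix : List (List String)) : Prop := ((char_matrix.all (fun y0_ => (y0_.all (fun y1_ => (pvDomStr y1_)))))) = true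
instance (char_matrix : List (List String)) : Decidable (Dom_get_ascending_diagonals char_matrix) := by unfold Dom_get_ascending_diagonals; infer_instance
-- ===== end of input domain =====

-- B replaces A's per-diagonal while-loop walk from precomputed start points by a single
-- row-by-row scan that buckets each cell into the diagonal indexed by x + y (same cost).

-- ===== PORT A =====
-- char_matrix[y][x]; every cell A touches is in range under Pre_, so the defaults never fire
def pvCellA (m : List (List String)) (y x : Int) : String :=
  (PySem.List.pyGet? ((PySem.List.pyGet? m y).getD []) x).getD ""

-- the 'while 0 <= x < len(...) and 0 <= y < len(...): line.append(...); x += 1; y -= 1' loop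
def pvWalk (m : List (List String)) (y x : Int) (line : List String) : List String :=
  if _h : 0 ≤ x ∧ x < (m.length : Int) ∧ 0 ≤ y ∧ y < (m.length : Int) then
    pvWalk m (y - 1) (x + 1) (line ++ [pvCellA m y x])
  else line
termination_by (y + 1).toNat
decreasing_by omega

def get_ascending_diagonals (char_matrix : List (List String)) : List (List String) :=
  let starts : List (Int × Int) :=
    (PySem.List.pyRange 0 ((char_matrix.length : Int) - 1) 1).map (fun i => (i, (0 : Int))) ++
    (PySem.List.pyRange 0 (char_matrix.length : Int) 1).map
      (fun i => ((char_matrix.length : Int) - 1, i))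
  starts.foldl (fun diagonals st => diagonals ++ [pvWalk char_matrix st.1 st.2 []]) []

-- ===== PORT B =====
-- char_matrix[y][x]; every cell B touches is in range under Pre_, so the defaults never fire
def pvCellB (m : List (List String)) (y x : Int) : String :=
  (PySem.List.pyGet? ((PySem.List.pyGet? m y).getD []) x).getD ""

def get_ascending_diagonals_alt (char_matrix : List (List String)) : List (List String) :=
  let n := char_matrix.length
  (PySem.List.pyRange ((n : Int) - 1) (-1) (-1)).foldl
    (fun ds y =>
      (PySem.List.pyRange 0 (n : Int) 1).foldl
        (fun ds x => ds.modify (x + y).toNat (fun l => l ++ [pvCellB char_matrix y x])) ds)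
    (List.replicate (2 * n - 1) [])

-- ===== PRECONDITION & SPEC =====
-- Pre_ excludes exactly the ragged matrices (some row shorter than the row count), on which
-- both the Python A and the Python B raise IndexError.
def Pre_get_ascending_diagonals (char_matrix : List (List String)) : Prop :=
  ∀ row ∈ char_matrix, char_matrix.length ≤ row.length
instance (char_matrix : List (List String)) : Decidable (Pre_get_ascending_diagonals char_matrix) := by unfold Pre_get_ascending_diagonals; infer_instance

def pvWitness_get_ascending_diagonals : List (List String) := [["a", "b"], ["c", "d"]]

def Spec_get_ascending_diagonals (char_matrix : List (List String)) (out : List (List String)) : Prop := out = get_ascending_diagonals_alt char_matrix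
instance (char_matrix : List (List String)) (out : List (List String)) : Decidable (Spec_get_ascending_diagonals char_matrix out) := by unfold Spec_get_ascending_diagonals; infer_instance

-- ===== CLAIM (what is proved, stated in full; the proofs are below) =====
def Claim_equal_get_ascending_diagonals : Prop := ∀ (char_matrix : List (List String)), Dom_get_ascending_diagonals char_matrix → Pre_get_ascending_diagonals char_matrix → Spec_get_ascending_diagonals char_matrix (get_ascending_diagonals char_matrix)

-- ===== LEMMAS AND PROOFS =====

-- [y, y-1, ..., 0] (empty for y < 0): the y-coordinates of one diagonal walk / of B's outer loop
def pvDesc (y : Int) : List Int :=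
  if _h : 0 ≤ y then y :: pvDesc (y - 1) else []
termination_by (y + 1).toNat
decreasing_by omega

-- the common per-diagonal description: the cell (y', s - y') of diagonal s, when it is in range
def pvDiagF (m : List (List String)) (s : Int) (y' : Int) : Option String :=
  if 0 ≤ s - y' ∧ s - y' < (m.length : Int) then some (pvCellA m y' (s - y')) else none

def pvDiag (m : List (List String)) (s : Int) : List String :=
  (pvDesc (min s ((m.length : Int) - 1))).filterMap (pvDiagF m s)

theorem pvDesc_mem : ∀ (k : Nat) (y : Int), (y + 1).toNat ≤ k →
    ∀ y' ∈ pvDesc y, 0 ≤ y' ∧ y' ≤ y := by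
  intro k
  induction k with
  | zero =>
    intro y hy y' hmem
    rw [pvDesc, dif_neg (by omega : ¬ (0 ≤ y))] at hmem
    simp at hmem
  | succ k ih =>
    intro y hy y' hmem
    rw [pvDesc] at hmem
    by_cases h0 : 0 ≤ y
    · simp only [dif_pos h0, List.mem_cons] at hmem
      rcases hmem with rfl | hmem
      · omega
      · have := ih (y - 1) (by omega) y' hmem; omega
    · simp [dif_neg h0] at hmem

theorem pvWalk_acc (m : List (List String)) : ∀ (k : Nat) (y x : Int) (l : List String),
    (y + 1).toNat ≤ k → pvWalk m y x l = l ++ pvWalk m y x [] := by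
  intro k
  induction k with
  | zero =>
    intro y x l hy
    conv_lhs => rw [pvWalk]
    conv_rhs => rw [pvWalk]
    rw [dif_neg (by omega), dif_neg (by omega)]
    simp
  | succ k ih =>
    intro y x l hy
    conv_lhs => rw [pvWalk]
    conv_rhs => rw [pvWalk]
    by_cases h : 0 ≤ x ∧ x < (m.length : Int) ∧ 0 ≤ y ∧ y < (m.length : Int)
    · rw [dif_pos h, dif_pos h,
        ih (y - 1) (x + 1) (l ++ _) (by omega), ih (y - 1) (x + 1) ([] ++ _) (by omega)]
      simp
    · rw [dif_neg h, dif_neg h]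
      simp

theorem pvWalk_eq (m : List (List String)) (s : Int) : ∀ (k : Nat) (y : Int),
    (y + 1).toNat ≤ k → y < (m.length : Int) → 0 ≤ s - y →
    pvWalk m y (s - y) [] = (pvDesc y).filterMap (pvDiagF m s) := by
  intro k
  induction k with
  | zero =>
    intro y hy hlt hx
    rw [pvWalk, pvDesc, dif_neg (by omega), dif_neg (by omega : ¬ (0 ≤ y))]
    simp
  | succ k ih =>
    intro y hy hlt hx
    rw [pvWalk, pvDesc]
    by_cases h0 : 0 ≤ y
    · simp only [dif_pos h0, List.filterMap_cons]
      by_cases hb : s - y < (m.length : Int)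
      · have hcond : 0 ≤ s - y ∧ s - y < (m.length : Int) ∧ 0 ≤ y ∧ y < (m.length : Int) := by omega
        rw [dif_pos hcond, pvWalk_acc m (k + 1) (y - 1) (s - y + 1) _ (by omega)]
        have hsy : s - y + 1 = s - (y - 1) := by omega
        rw [hsy, ih (y - 1) (by omega) (by omega) (by omega)]
        simp only [pvDiagF, if_pos (show 0 ≤ s - y ∧ s - y < (m.length : Int) by omega)]
        simp
      · rw [dif_neg (by omega)]
        simp only [pvDiagF, if_neg (show ¬ (0 ≤ s - y ∧ s - y < (m.length : Int)) by omega)]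
        rw [List.filterMap_eq_nil_iff.mpr]
        intro y' hmem
        have := pvDesc_mem ((y - 1 + 1).toNat) (y - 1) (le_refl _) y' hmem
        rw [if_neg (show ¬ (0 ≤ s - y' ∧ s - y' < (m.length : Int)) by omega)]
    · rw [dif_neg (by omega), dif_neg h0]
      simp

theorem A_eq (m : List (List String)) :
    get_ascending_diagonals m =
      (List.range (2 * m.length - 1)).map (fun s : Nat => pvDiag m (s : Int)) := by
  rcases Nat.eq_zero_or_pos m.length with hn | hn
  · have h0 : m = [] := List.length_eq_zero_iff.mp hn
    subst h0; rfl
  · have hR : (List.range (2 * m.length - 1)).map (fun s : Nat => pvDiag m (s : Int))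
        = ((List.range (m.length - 1)).map (fun s : Nat => pvDiag m (s : Int)))
          ++ ((List.range m.length).map (fun k => pvDiag m ((m.length - 1 + k : Nat) : Int))) := by
      rw [show 2 * m.length - 1 = (m.length - 1) + m.length from by omega, List.range_add,
        List.map_append, List.map_map]
      rfl
    unfold get_ascending_diagonals
    rw [hR, PySem.List.foldl_append_singleton_eq_map, List.nil_append, List.map_append,
        List.map_map, List.map_map, PySem.List.pyRange_one, PySem.List.pyRange_one,
        List.map_map, List.map_map,
        show ((m.length : Int) - 1 - 0).toNat = m.length - 1 from by omega,
        show ((m.length : Int) - 0).toNat = m.length from by omega]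
    congr 1
    · apply List.map_congr_left
      intro k hk
      rw [List.mem_range] at hk
      have hk' : k < m.length - 1 := by omega
      have hw := pvWalk_eq m (k : Int) ((k : Int) + 1).toNat (k : Int) le_rfl (by omega) (by omega)
      simp only [sub_self] at hw
      simp only [Function.comp_apply]
      rw [show (0 : Int) + (k : Int) = (k : Int) by omega, hw, pvDiag,
        min_eq_left (by omega : (k : Int) ≤ (m.length : Int) - 1)]
    · apply List.map_congr_left
      intro k hk
      rw [List.mem_range] at hk
      have hw := pvWalk_eq m ((m.length : Int) - 1 + (k : Int)) ((m.length : Int)).toNat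
        ((m.length : Int) - 1) (by omega) (by omega) (by omega)
      rw [show (m.length : Int) - 1 + (k : Int) - ((m.length : Int) - 1) = (k : Int) by omega] at hw
      simp only [Function.comp_apply]
      rw [show (0 : Int) + (k : Int) = (k : Int) by omega, hw, pvDiag]
      rw [show ((m.length - 1 + k : Nat) : Int) = (m.length : Int) - 1 + (k : Int) by omega,
        min_eq_right (by omega : (m.length : Int) - 1 ≤ (m.length : Int) - 1 + (k : Int))]

-- one row of B's scan: cell (y, x) lands in bucket x + y
theorem inner_getElem? (m : List (List String)) (y : Int) (hy : 0 ≤ y) :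
    ∀ (k : Nat) (ds : List (List String)) (s : Nat),
    ((PySem.List.pyRange 0 (k : Int) 1).foldl
        (fun ds x => ds.modify (x + y).toNat (fun l => l ++ [pvCellB m y x])) ds)[s]?
      = if y ≤ (s : Int) ∧ (s : Int) < y + k then
          (ds[s]?).map (fun l => l ++ [pvCellB m y ((s : Int) - y)]) else ds[s]? := by
  intro k
  induction k with
  | zero =>
    intro ds s
    rw [PySem.List.pyRange_one_eq_nil (by omega), if_neg (by omega)]
    rfl
  | succ k ih =>
    intro ds s
    rw [show ((k + 1 : Nat) : Int) = (k : Int) + 1 from by omega,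
      PySem.List.pyRange_one_succ_right (by omega), List.foldl_append, List.foldl_cons,
      List.foldl_nil, List.getElem?_modify, ih]
    by_cases hs : (s : Int) = (k : Int) + y
    · have h1 : ((k : Int) + y).toNat = s := by omega
      rw [if_neg (by omega), h1, if_pos (by omega)]
      cases hds : ds[s]? with
      | none => rfl
      | some l => rw [show (s : Int) - y = (k : Int) from by omega]; simp
    · have h1 : ¬ (((k : Int) + y).toNat = s) := by omega
      by_cases hc : y ≤ (s : Int) ∧ (s : Int) < y + k
      · rw [if_pos hc, if_pos (by omega)]
        cases ds[s]? with
        | none => rfl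
        | some l => simp [h1]
      · rw [if_neg hc, if_neg (by omega)]
        cases ds[s]? with
        | none => rfl
        | some l => simp [h1]

-- B's whole scan: bucket s collects the cells (y, s - y), y descending along ys
theorem outer_getElem? (m : List (List String)) :
    ∀ (ys : List Int), (∀ y ∈ ys, 0 ≤ y) → ∀ (ds : List (List String)) (s : Nat),
    (ys.foldl (fun ds y =>
        (PySem.List.pyRange 0 (m.length : Int) 1).foldl
          (fun ds x => ds.modify (x + y).toNat (fun l => l ++ [pvCellB m y x])) ds) ds)[s]?
      = (ds[s]?).map (fun l => l ++ ys.filterMap (pvDiagF m (s : Int))) := by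
  intro ys
  induction ys with
  | nil =>
    intro _ ds s
    rw [List.foldl_nil, List.filterMap_nil]
    cases h : ds[s]? <;> simp
  | cons y ys ih =>
    intro hmem ds s
    rw [List.foldl_cons, ih (fun y' h => hmem y' (List.mem_cons_of_mem _ h)),
      inner_getElem? m y (hmem y (List.mem_cons_self)) m.length ds s, List.filterMap_cons]
    by_cases hc : y ≤ (s : Int) ∧ (s : Int) < y + m.length
    · rw [if_pos hc, show pvDiagF m (s : Int) y = some (pvCellB m y ((s : Int) - y)) from by
        unfold pvDiagF pvCellA pvCellB; rw [if_pos (by omega)]]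
      cases h : ds[s]? <;> simp
    · rw [if_neg hc, show pvDiagF m (s : Int) y = none from by
        unfold pvDiagF; rw [if_neg (by omega)]]

theorem pyRange_down_eq_pvDesc : ∀ (k : Nat) (a : Int), (a + 1).toNat ≤ k →
    PySem.List.pyRange a (-1) (-1) = pvDesc a := by
  intro k
  induction k with
  | zero =>
    intro a ha
    rw [PySem.List.pyRange_neg_one_eq_nil (by omega), pvDesc, dif_neg (by omega)]
  | succ k ih =>
    intro a ha
    by_cases h0 : 0 ≤ a
    · rw [PySem.List.pyRange_neg_one_cons (by omega), pvDesc, dif_pos h0, ih (a - 1) (by omega)]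
    · rw [PySem.List.pyRange_neg_one_eq_nil (by omega), pvDesc, dif_neg h0]

-- a prefix of pvDesc on which f vanishes can be dropped
theorem filterMap_pvDesc_drop (f : Int → Option String) : ∀ (k : Nat) (a b : Int),
    (a + 1).toNat ≤ k → b ≤ a → (∀ y', b < y' → f y' = none) →
    (pvDesc a).filterMap f = (pvDesc b).filterMap f := by
  intro k
  induction k with
  | zero =>
    intro a b ha hb _hf
    rw [pvDesc, dif_neg (by omega), pvDesc, dif_neg (by omega)]
  | succ k ih =>
    intro a b ha hb hf
    by_cases hab : b = a
    · rw [hab]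
    · by_cases h0 : 0 ≤ a
      · rw [pvDesc, dif_pos h0, List.filterMap_cons, hf a (by omega),
          ih (a - 1) b (by omega) (by omega) hf]
      · rw [pvDesc, dif_neg h0, pvDesc, dif_neg (by omega)]

theorem B_eq (m : List (List String)) :
    get_ascending_diagonals_alt m =
      (List.range (2 * m.length - 1)).map (fun s : Nat => pvDiag m (s : Int)) := by
  apply List.ext_getElem?
  intro s
  simp only [get_ascending_diagonals_alt]
  rw [pyRange_down_eq_pvDesc ((m.length : Int) - 1 + 1).toNat ((m.length : Int) - 1) le_rfl,
    outer_getElem? m _ (fun y h => (pvDesc_mem ((m.length : Int) - 1 + 1).toNat _ le_rfl y h).1),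
    List.getElem?_replicate, List.getElem?_map]
  by_cases hs : s < 2 * m.length - 1
  · rw [if_pos hs, List.getElem?_range hs, Option.map_some, Option.map_some, List.nil_append,
      pvDiag]
    by_cases h2 : (s : Int) ≤ (m.length : Int) - 1
    · rw [min_eq_left h2,
        filterMap_pvDesc_drop (pvDiagF m (s : Int)) ((m.length : Int) - 1 + 1).toNat
          ((m.length : Int) - 1) (s : Int) le_rfl (by omega)
          (fun y' hy' => by unfold pvDiagF; rw [if_neg (by omega)])]
    · rw [min_eq_right (by omega)]
  · rw [if_neg hs, List.getElem?_eq_none_iff.mpr (by rw [List.length_range]; omega),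
      Option.map_none, Option.map_none]

-- ===== VERDICT (by name: the statement is the Claim_ definition above) =====
theorem get_ascending_diagonals_spec : Claim_equal_get_ascending_diagonals := by
  intro m _ _
  unfold Spec_get_ascending_diagonals
  rw [A_eq, B_eq]
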